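-- pv_equiv track=rewrite | github.com/deamonkai/nscertkeycreate | certctl/scripts/csr_create.py | _extract_cn
-- ===== SOURCE A (Python) =====
-- def _extract_cn(subject: str) -> str:
--     subject = subject.strip()
--     if subject.startswith("/"):
--         parts = [p for p in subject.split("/") if p]
--         for part in parts:
--             if part.upper().startswith("CN="):
--                 return part.split("=", 1)[1].strip()
--         return ""
--     for part in subject.split(","):
--         if part.strip().upper().startswith("CN="):
--             return part.split("=", 1)[1].strip()
--     return ""
-- ===== SOURCE B (Python) =====
-- def _extract_cn(subject: str) -> str:
--     subject = subject.strip()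
--     if subject.startswith("/"):
--         parts = [p for p in subject.split("/") if p]
--     else:
--         parts = [p.strip() for p in subject.split(",")]
--     table = {}
--     for part in parts:
--         if "=" not in part:
--             continue
--         key, value = part.split("=", 1)
--         key = key.upper()
--         if key not in table:
--             table[key] = value
--     return table.get("CN", "").strip()
-- ===== Notes on version B (the rewrite author's own statement) =====
-- stated objective: alternative
-- what changed: Replaces A's two early-return linear scans (one per subject format) by a single pass that builds a first-occurrence-wins key->value dictionary over all parts and then answers with one table lookup of the common-name key.
import Mathlib
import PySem

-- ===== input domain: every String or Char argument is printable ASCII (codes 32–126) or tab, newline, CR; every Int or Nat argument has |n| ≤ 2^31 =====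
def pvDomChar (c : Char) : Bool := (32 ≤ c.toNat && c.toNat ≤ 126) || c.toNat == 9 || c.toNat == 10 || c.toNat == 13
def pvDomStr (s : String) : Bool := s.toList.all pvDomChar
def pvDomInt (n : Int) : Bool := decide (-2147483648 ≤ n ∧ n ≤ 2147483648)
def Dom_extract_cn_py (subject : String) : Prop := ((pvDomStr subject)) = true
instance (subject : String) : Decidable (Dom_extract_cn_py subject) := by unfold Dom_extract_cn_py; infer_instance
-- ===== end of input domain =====

-- B replaces A's two early-return scans by one pass that builds a first-occurrence-wins
-- key→value table and then looks up "CN" (objective: alternative decomposition, same cost).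

-- ===== PORT A =====
-- the slash-format scan: 'for part in parts: if part.upper().startswith("CN="): return part.split("=",1)[1].strip()'
def extractA_loopSlash : List String → String
  | [] => ""
  | part :: rest =>
    if PySem.Str.startswith (PySem.Str.upper part) "CN=" then
      PySem.Str.strip (PySem.List.pyGetD ((PySem.Str.splitMax? part "=" 1).getD []) 1 "")
    else extractA_loopSlash rest

-- the comma-format scan: 'for part in subject.split(","): if part.strip().upper().startswith("CN="): return part.split("=",1)[1].strip()'
-- (the [1] index is guarded by the startswith test, which guarantees an '=' — pyGetD's default is never used)
def extractA_loopComma : List String → String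
  | [] => ""
  | part :: rest =>
    if PySem.Str.startswith (PySem.Str.upper (PySem.Str.strip part)) "CN=" then
      PySem.Str.strip (PySem.List.pyGetD ((PySem.Str.splitMax? part "=" 1).getD []) 1 "")
    else extractA_loopComma rest

def extract_cn_py (subject : String) : String :=
  let s := PySem.Str.strip subject
  if PySem.Str.startswith s "/" then
    extractA_loopSlash (((PySem.Str.split? s "/").getD []).filter (fun p => p ≠ ""))
  else
    extractA_loopComma ((PySem.Str.split? s ",").getD [])

-- ===== PORT B =====
-- one step of B's table-building loop: skip '='-less parts; first occurrence of a key wins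
def extractB_step (d : PySem.Dict String String) (part : String) : PySem.Dict String String :=
  if PySem.Str.isIn "=" part then
    let kv := (PySem.Str.splitMax? part "=" 1).getD []
    let key := PySem.Str.upper (PySem.List.pyGetD kv 0 "")
    if d.contains key then d else d.insert key (PySem.List.pyGetD kv 1 "")
  else d

def extract_cn_py_alt (subject : String) : String :=
  let s := PySem.Str.strip subject
  let parts :=
    if PySem.Str.startswith s "/" then
      ((PySem.Str.split? s "/").getD []).filter (fun p => p ≠ "")
    else
      ((PySem.Str.split? s ",").getD []).map PySem.Str.strip
  PySem.Str.strip ((parts.foldl extractB_step PySem.Dict.empty).getD "CN" "")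

-- ===== PRECONDITION & SPEC =====
def Spec_extract_cn_py (subject : String) (out : String) : Prop := out = extract_cn_py_alt subject
instance (subject : String) (out : String) : Decidable (Spec_extract_cn_py subject out) := by unfold Spec_extract_cn_py; infer_instance

-- ===== CLAIM (what is proved, stated in full; the proofs are below) =====
def Claim_equal_extract_cn_py : Prop := ∀ (subject : String), Dom_extract_cn_py subject → Spec_extract_cn_py subject (extract_cn_py subject)

-- ===== LEMMAS AND PROOFS =====

-- key/value of "part.split('=', 1)" on the character level
def pvKeyC (cs : List Char) : List Char := cs.takeWhile (· ≠ '=')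
def pvValC (cs : List Char) : List Char := (cs.dropWhile (· ≠ '=')).drop 1

-- B's per-part predicate: the condition under which extractB_step inserts under key "CN"
def pvPredB (part : String) : Bool :=
  PySem.Str.isIn "=" part &&
    (PySem.Str.upper (PySem.List.pyGetD ((PySem.Str.splitMax? part "=" 1).getD []) 0 "") == "CN")

-- the raw (unstripped) value of the first part A's scan accepts
def pvFirstCN : List String → Option String
  | [] => none
  | p :: rest =>
      if pvPredB p then some (PySem.List.pyGetD ((PySem.Str.splitMax? p "=" 1).getD []) 1 "")
      else pvFirstCN rest

theorem pv_go_m0 (sep : List Char) (fuel : Nat) (l cur : List Char) (acc : List (List Char)) :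
    PySem.Chars.splitOnMax.go sep fuel 0 l cur acc = ((cur.reverse ++ l) :: acc).reverse := by
  cases fuel with
  | zero => rfl
  | succ f => cases l <;> simp [PySem.Chars.splitOnMax.go]

theorem pv_go_m1 (l : List Char) (fuel : Nat) (cur : List Char) (acc : List (List Char))
    (h : l.length < fuel) :
    PySem.Chars.splitOnMax.go ['='] fuel 1 l cur acc =
      acc.reverse ++ (if '=' ∈ l then [cur.reverse ++ pvKeyC l, pvValC l] else [cur.reverse ++ l]) := by
  induction l generalizing fuel cur acc with
  | nil =>
    cases fuel with
    | zero => omega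
    | succ f => simp [PySem.Chars.splitOnMax.go]
  | cons c rest ih =>
    cases fuel with
    | zero => simp at h
    | succ f =>
      by_cases hc : c = '='
      · subst hc
        rw [show PySem.Chars.splitOnMax.go ['='] (f+1) 1 ('=' :: rest) cur acc =
            PySem.Chars.splitOnMax.go ['='] f 0 rest [] (cur.reverse :: acc) from by
          simp [PySem.Chars.splitOnMax.go, List.isPrefixOf]]
        rw [pv_go_m0]
        simp [pvKeyC, pvValC]
      · rw [show PySem.Chars.splitOnMax.go ['='] (f+1) 1 (c :: rest) cur acc =
            PySem.Chars.splitOnMax.go ['='] f 1 rest (c :: cur) acc from by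
          simp [PySem.Chars.splitOnMax.go, List.isPrefixOf, Ne.symm hc]]
        rw [ih f (c :: cur) acc (by simp at h ⊢; omega)]
        simp [pvKeyC, pvValC, hc]
        split <;> simp_all [Ne.symm hc]

theorem pv_splitOnMax_eq (cs : List Char) :
    PySem.Chars.splitOnMax cs ['='] 1 =
      if '=' ∈ cs then [pvKeyC cs, pvValC cs] else [cs] := by
  show PySem.Chars.splitOnMax.go _ _ _ _ _ _ = _
  rw [show (1:Int).toNat = 1 from rfl, pv_go_m1 cs (cs.length + 1) [] [] (by omega)]
  simp

theorem pv_kv_eq (part : String) :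
    (PySem.Str.splitMax? part "=" 1).getD [] =
      if '=' ∈ part.toList then [String.ofList (pvKeyC part.toList), String.ofList (pvValC part.toList)]
      else [part] := by
  have h : ("=" : String).toList = ['='] := rfl
  simp [PySem.Str.splitMax?, PySem.Chars.splitMax?, h, pv_splitOnMax_eq]
  split <;> simp [String.ofList]

theorem pv_charOfNat_toNat (n : Nat) (h : Nat.isValidChar n) : (Char.ofNat n).toNat = n := by
  unfold Char.ofNat
  rw [dif_pos h]
  simp [Char.ofNatAux, Char.toNat, UInt32.toNat_ofNatLT]

theorem pv_upperChar_eq_iff (c : Char) : PySem.Chars.upperChar c = '=' ↔ c = '=' := by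
  unfold PySem.Chars.upperChar PySem.Chars.islower
  split
  · rename_i hl
    simp only [Bool.and_eq_true, decide_eq_true_eq] at hl
    have h1 : 97 ≤ c.toNat := Nat.succ_le_of_lt hl.1
    have h2 : c.toNat ≤ 122 := hl.2
    have hv : Nat.isValidChar (c.toNat - 32) := Or.inl (by omega)
    constructor
    · intro he
      have heq : (Char.ofNat (c.toNat - 32)).toNat = ('=' : Char).toNat := by rw [he]
      rw [pv_charOfNat_toNat _ hv] at heq
      have he61 : ('=' : Char).toNat = 61 := rfl
      omega
    · intro hc; subst hc; simp at h1
  · simp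

theorem pv_upperChar_ne_of (c : Char) (d : Char) (hd : d ≠ '=') (h : PySem.Chars.upperChar c = d) : c ≠ '=' := by
  intro hc; subst hc; exact hd (h ▸ rfl)

-- A's test "part.upper().startswith('CN=')" ≡ "'=' in part and part-before-'=' uppercases to 'CN'"
theorem pv_pred_iff (cs : List Char) :
    PySem.Chars.startswith (PySem.Chars.upper cs) ['C','N','='] = true ↔
      ('=' ∈ cs ∧ PySem.Chars.upper (pvKeyC cs) = ['C','N']) := by
  unfold PySem.Chars.startswith PySem.Chars.upper pvKeyC
  constructor
  · intro h
    match cs with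
    | [] => simp at h
    | [c1] => simp [List.isPrefixOf] at h
    | [c1, c2] => simp [List.isPrefixOf] at h
    | c1 :: c2 :: c3 :: rest =>
      simp only [List.map, List.isPrefixOf, Bool.and_eq_true, beq_iff_eq] at h
      obtain ⟨h1, h2, h3, -⟩ := h
      have hc1 : c1 ≠ '=' := pv_upperChar_ne_of c1 'C' (by decide) h1.symm
      have hc2 : c2 ≠ '=' := pv_upperChar_ne_of c2 'N' (by decide) h2.symm
      have hc3 : c3 = '=' := (pv_upperChar_eq_iff c3).mp h3.symm
      subst hc3
      refine ⟨by simp, ?_⟩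
      simp [List.takeWhile, hc1, hc2, h1.symm, h2.symm]
  · rintro ⟨hmem, hkey⟩
    match cs with
    | [] => simp at hmem
    | c1 :: t1 =>
      by_cases hc1 : c1 = '='
      · subst hc1; simp [List.takeWhile] at hkey
      · rw [List.takeWhile_cons_of_pos (by simp [hc1])] at hkey
        match t1 with
        | [] => simp at hkey
        | c2 :: t2 =>
          by_cases hc2 : c2 = '='
          · subst hc2; simp [List.takeWhile] at hkey
          · rw [List.takeWhile_cons_of_pos (by simp [hc2])] at hkey
            simp only [List.map, List.cons.injEq] at hkey
            obtain ⟨h1, h2, hrest⟩ := hkey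
            have htw := List.map_eq_nil_iff.mp hrest
            have hm2 : '=' ∈ t2 := by
              simp only [List.mem_cons] at hmem
              rcases hmem with hx | hx | hx
              · exact absurd hx.symm hc1
              · exact absurd hx.symm hc2
              · exact hx
            match t2 with
            | [] => simp at hm2
            | c3 :: t3 =>
              have hc3 : c3 = '=' := by
                by_contra hne
                rw [List.takeWhile_cons_of_pos (by simp [hne])] at htw
                simp at htw
              subst hc3
              simp [List.isPrefixOf, h1, h2]
              rfl

theorem pv_isIn_eq (part : String) : PySem.Str.isIn "=" part = decide ('=' ∈ part.toList) := by
  have h : ("=" : String).toList = ['='] := rfl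
  by_cases hm : '=' ∈ part.toList
  · simp only [PySem.Str.isIn_eq, h, hm, decide_true]
    rw [PySem.Chars.isIn_iff_infix, List.singleton_infix_iff]
    exact hm
  · simp only [PySem.Str.isIn_eq, h, hm, decide_false]
    rw [PySem.Chars.isIn_eq_false_iff, List.singleton_infix_iff]
    exact hm

-- A's per-part test equals B's per-part test
theorem pv_predA_eq_predB (part : String) :
    PySem.Str.startswith (PySem.Str.upper part) "CN=" = pvPredB part := by
  rw [Bool.eq_iff_iff]
  have hsw : PySem.Str.startswith (PySem.Str.upper part) "CN=" =
      PySem.Chars.startswith (PySem.Chars.upper part.toList) ['C','N','='] := by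
    simp only [PySem.Str.startswith, PySem.Str.toList_upper]
    rfl
  rw [hsw, pv_pred_iff]
  unfold pvPredB
  rw [pv_isIn_eq, pv_kv_eq]
  by_cases h : '=' ∈ part.toList
  · simp only [h, if_pos, decide_true, Bool.true_and, true_and]
    have h0 : PySem.List.pyGetD [String.ofList (pvKeyC part.toList), String.ofList (pvValC part.toList)] (0:Int) "" = String.ofList (pvKeyC part.toList) := rfl
    rw [h0]
    constructor
    · intro hk
      apply beq_iff_eq.mpr
      apply String.toList_inj.mp
      have : (PySem.Str.upper (String.ofList (pvKeyC part.toList))).toList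
          = PySem.Chars.upper (pvKeyC part.toList) := by simp
      rw [this, hk]; rfl
    · intro hk
      have h2 := congrArg String.toList (eq_of_beq hk)
      simpa using h2
  · simp [h]

theorem pv_step_get? (d : PySem.Dict String String) (p : String) :
    (extractB_step d p).get? "CN" =
      (d.get? "CN").or (if pvPredB p then some (PySem.List.pyGetD ((PySem.Str.splitMax? p "=" 1).getD []) 1 "") else none) := by
  unfold extractB_step
  by_cases hin : PySem.Str.isIn "=" p = true
  · simp only [hin, if_true]
    set key := PySem.Str.upper (PySem.List.pyGetD ((PySem.Str.splitMax? p "=" 1).getD []) 0 "") with hkey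
    have hpred : pvPredB p = (key == "CN") := by
      unfold pvPredB; rw [hin, ← hkey, Bool.true_and]
    by_cases hk : key = "CN"
    · rw [hpred, beq_iff_eq.mpr hk, if_pos rfl]
      by_cases hc : d.contains key = true
      · simp only [hc, if_true]
        have hne : d.get? "CN" ≠ none := by
          rw [Ne, PySem.Dict.get?_eq_none_iff_contains, ← hk]
          simp [hc]
        cases hg : d.get? "CN" with
        | none => exact absurd hg hne
        | some v => simp
      · rw [if_neg hc]
        have hnone : d.get? "CN" = none := by
          rw [PySem.Dict.get?_eq_none_iff_contains, ← hk]
          simpa using hc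
        rw [PySem.Dict.get?_insert, if_pos hk.symm, hnone]
        rfl
    · have hkb : (key == "CN") = false := beq_eq_false_iff_ne.mpr hk
      rw [hpred, hkb]
      simp only [Bool.false_eq_true, if_false, Option.or_none]
      split
      · rfl
      · rw [PySem.Dict.get?_insert, if_neg (fun hcc => hk hcc.symm)]
  · simp only [Bool.not_eq_true] at hin
    have hpf : pvPredB p = false := by unfold pvPredB; rw [hin, Bool.false_and]
    rw [hin, hpf]
    simp

theorem pv_opt_or_ite {α : Type} (P : Bool) (v : α) (x : Option α) :
    ((if P then some v else none).or x) = if P then some v else x := by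
  split <;> simp

-- B's table lookup is the first match of A's scan
theorem pv_foldl_get? (parts : List String) (d : PySem.Dict String String) :
    ((parts.foldl extractB_step d).get? "CN") = (d.get? "CN").or (pvFirstCN parts) := by
  induction parts generalizing d with
  | nil => simp [pvFirstCN]
  | cons p rest ih =>
    rw [List.foldl_cons, ih, pv_step_get?, Option.or_assoc, pv_opt_or_ite]
    rfl

theorem pv_dropWhile_spaces (t : List Char) (h : ∀ c ∈ t, PySem.Chars.isspace c = true) :
    t.dropWhile (fun c => decide (c ≠ '=')) = [] := by
  rw [List.dropWhile_eq_nil_iff]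
  intro c hc
  simp only [decide_eq_true_eq, Ne]
  intro he
  subst he
  exact absurd (h _ hc) (by decide)

theorem pv_rstrip_append_spaces (x t : List Char) (h : ∀ c ∈ t, PySem.Chars.isspace c = true) :
    PySem.Chars.rstrip (x ++ t) = PySem.Chars.rstrip x := by
  unfold PySem.Chars.rstrip
  rw [List.reverse_append, List.dropWhile_append]
  have : t.reverse.dropWhile PySem.Chars.isspace = [] := by
    rw [List.dropWhile_eq_nil_iff]; intro c hc; exact h c (List.mem_reverse.mp hc)
  simp [this]

theorem pv_strip_append_spaces (x t : List Char) (h : ∀ c ∈ t, PySem.Chars.isspace c = true) :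
    PySem.Chars.strip (x ++ t) = PySem.Chars.strip x := by
  unfold PySem.Chars.strip PySem.Chars.lstrip
  rw [List.dropWhile_append]
  by_cases hx : x.dropWhile PySem.Chars.isspace = []
  · have ht : t.dropWhile PySem.Chars.isspace = [] := by
      rw [List.dropWhile_eq_nil_iff]; exact h
    simp [hx, ht]
  · simp only [hx, List.isEmpty_iff]
    exact pv_rstrip_append_spaces _ t h

theorem pv_lstrip_decomp (cs : List Char) :
    ∃ t, PySem.Chars.lstrip cs = PySem.Chars.strip cs ++ t ∧
      (∀ c ∈ t, PySem.Chars.isspace c = true) := by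
  refine ⟨((PySem.Chars.lstrip cs).reverse.takeWhile PySem.Chars.isspace).reverse, ?_, ?_⟩
  · unfold PySem.Chars.strip PySem.Chars.rstrip
    conv_lhs => rw [← List.reverse_reverse (PySem.Chars.lstrip cs),
      ← List.takeWhile_append_dropWhile (p := PySem.Chars.isspace) (l := (PySem.Chars.lstrip cs).reverse)]
    rw [List.reverse_append]
  · intro c hc
    exact List.mem_takeWhile_imp (List.mem_reverse.mp hc)

-- stripping the whole part first does not change the stripped value after the first '='
theorem pv_val_strip (cs : List Char) (h : '=' ∈ PySem.Chars.strip cs) :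
    PySem.Chars.strip (pvValC cs) = PySem.Chars.strip (pvValC (PySem.Chars.strip cs)) := by
  have step1 : pvValC cs = pvValC (PySem.Chars.lstrip cs) := by
    unfold pvValC
    conv_lhs => rw [← List.takeWhile_append_dropWhile (p := PySem.Chars.isspace) (l := cs)]
    rw [List.dropWhile_append]
    have : (cs.takeWhile PySem.Chars.isspace).dropWhile (fun c => decide (c ≠ '=')) = [] := by
      apply pv_dropWhile_spaces
      intro c hc
      exact List.mem_takeWhile_imp hc
    rw [this]
    simp [PySem.Chars.lstrip]
  obtain ⟨t, hd, hsp⟩ := pv_lstrip_decomp cs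
  have hne : (PySem.Chars.strip cs).dropWhile (fun c => decide (c ≠ '=')) ≠ [] := by
    rw [Ne, List.dropWhile_eq_nil_iff]
    intro hall
    have := hall '=' h
    simp at this
  have step3 : pvValC (PySem.Chars.lstrip cs) = pvValC (PySem.Chars.strip cs) ++ t := by
    rw [hd]
    unfold pvValC
    rw [List.dropWhile_append]
    simp only [List.isEmpty_iff, if_neg hne]
    rw [List.drop_append_of_le_length]
    · exact Nat.one_le_iff_ne_zero.mpr (by simpa [List.length_eq_zero_iff] using hne)
  rw [step1, step3, pv_strip_append_spaces _ _ hsp]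

theorem pv_mem_strip (cs : List Char) (h : '=' ∈ PySem.Chars.strip cs) : '=' ∈ cs := by
  unfold PySem.Chars.strip PySem.Chars.rstrip PySem.Chars.lstrip at h
  have h1 := List.mem_reverse.mp h
  have h2 := (List.dropWhile_sublist _).mem h1
  have h3 := List.mem_reverse.mp h2
  exact (List.dropWhile_sublist _).mem h3

theorem pv_val_strip_str (part : String) (h : pvPredB (PySem.Str.strip part) = true) :
    PySem.Str.strip (PySem.List.pyGetD ((PySem.Str.splitMax? part "=" 1).getD []) 1 "") =
      PySem.Str.strip (PySem.List.pyGetD ((PySem.Str.splitMax? (PySem.Str.strip part) "=" 1).getD []) 1 "") := by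
  have hsl : (PySem.Str.strip part).toList = PySem.Chars.strip part.toList := by simp
  have hmem : '=' ∈ PySem.Chars.strip part.toList := by
    unfold pvPredB at h
    rw [pv_isIn_eq] at h
    have := (Bool.and_eq_true _ _).mp h |>.1
    rw [hsl] at this
    exact of_decide_eq_true this
  have hmem0 : '=' ∈ part.toList := pv_mem_strip _ hmem
  rw [pv_kv_eq, pv_kv_eq, if_pos hmem0, if_pos (hsl ▸ hmem : '=' ∈ (PySem.Str.strip part).toList)]
  have e1 : PySem.List.pyGetD [String.ofList (pvKeyC part.toList), String.ofList (pvValC part.toList)] (1:Int) "" = String.ofList (pvValC part.toList) := rfl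
  have e2 : PySem.List.pyGetD [String.ofList (pvKeyC (PySem.Str.strip part).toList), String.ofList (pvValC (PySem.Str.strip part).toList)] (1:Int) "" = String.ofList (pvValC (PySem.Str.strip part).toList) := rfl
  rw [e1, e2]
  apply String.toList_inj.mp
  simp only [PySem.Str.strip, String.toList_ofList]
  exact pv_val_strip _ hmem

theorem pv_slash_loop (parts : List String) :
    extractA_loopSlash parts = PySem.Str.strip ((pvFirstCN parts).getD "") := by
  induction parts with
  | nil => rfl
  | cons p rest ih =>
    unfold extractA_loopSlash pvFirstCN
    rw [pv_predA_eq_predB]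
    by_cases hp : pvPredB p
    · rw [if_pos hp, if_pos hp, Option.getD_some]
    · rw [if_neg hp, if_neg hp]
      exact ih

theorem pv_comma_loop (parts : List String) :
    extractA_loopComma parts = PySem.Str.strip ((pvFirstCN (parts.map PySem.Str.strip)).getD "") := by
  induction parts with
  | nil => rfl
  | cons p rest ih =>
    show (if PySem.Str.startswith (PySem.Str.upper (PySem.Str.strip p)) "CN=" then
        PySem.Str.strip (PySem.List.pyGetD ((PySem.Str.splitMax? p "=" 1).getD []) 1 "")
      else extractA_loopComma rest) = _
    rw [List.map_cons]
    show _ = PySem.Str.strip ((if pvPredB (PySem.Str.strip p) then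
        some (PySem.List.pyGetD ((PySem.Str.splitMax? (PySem.Str.strip p) "=" 1).getD []) 1 "")
      else pvFirstCN (rest.map PySem.Str.strip)).getD "")
    rw [pv_predA_eq_predB (PySem.Str.strip p)]
    by_cases hp : pvPredB (PySem.Str.strip p)
    · rw [if_pos hp, if_pos hp, Option.getD_some]
      exact pv_val_strip_str p hp
    · rw [if_neg hp, if_neg hp]
      exact ih

theorem pv_alt_eq (parts : List String) :
    PySem.Str.strip ((parts.foldl extractB_step PySem.Dict.empty).getD "CN" "") =
      PySem.Str.strip ((pvFirstCN parts).getD "") := by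
  rw [PySem.Dict.getD_eq_get?_getD, pv_foldl_get?, PySem.Dict.get?_empty, Option.none_or]

-- ===== VERDICT (by name: the statement is the Claim_ definition above) =====
theorem extract_cn_py_spec : Claim_equal_extract_cn_py := by
  intro subject _
  unfold Spec_extract_cn_py extract_cn_py extract_cn_py_alt
  simp only
  by_cases hs : PySem.Str.startswith (PySem.Str.strip subject) "/" = true
  all_goals simp only [hs, if_true, if_false, Bool.false_eq_true]
  · rw [pv_slash_loop, pv_alt_eq]
  · rw [pv_comma_loop, pv_alt_eq]
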